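-- pv_equiv track=rewrite | github.com/masonkimseoul/Algorithm_Study | sprint05/KMS/First week/PGS_42586.py | solution
-- ===== SOURCE A (Python) =====
-- from collections import deque
--
-- def solution(progresses, speeds):
--     answer = []
--     complete = deque()
--     for i in range(len(progresses)):
--         cnt = 0
--         while progresses[i] < 100:
--             progresses[i] += speeds[i]
--             cnt +=1
--         complete.append(cnt)
--
--     cnt = 0
--     while complete:
--         tmp = complete[0]
--         while complete:
--             if complete[0] <= tmp:
--                 complete.popleft()
--                 cnt +=1
--             else:
--                 break
--         if cnt != 0:
--             answer.append(cnt)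
--             cnt = 0
--     return answer
-- ===== SOURCE B (Python) =====
-- def solution(progresses, speeds):
--     answer = []
--     leader = None
--     for i, p in enumerate(progresses):
--         d = 0 if p >= 100 else -((p - 100) // speeds[i])
--         if leader is None or d > leader:
--             answer.append(1)
--             leader = d
--         else:
--             answer[-1] += 1
--     return answer
-- ===== Notes on version B (the rewrite author's own statement) =====
-- stated objective: faster
-- what changed: Replaces A's day-by-day simulation of each task and its two-phase deque grouping with a single pass that computes each task's days by ceiling division -((p-100)//s) and groups deploys on the fly against the current group leader; intended as faster (A is O(n*max_days)): a timing run saw A time out at n=16 where B returned, though no clean ratio could be measured at sizes where both finish.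
import Mathlib
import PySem

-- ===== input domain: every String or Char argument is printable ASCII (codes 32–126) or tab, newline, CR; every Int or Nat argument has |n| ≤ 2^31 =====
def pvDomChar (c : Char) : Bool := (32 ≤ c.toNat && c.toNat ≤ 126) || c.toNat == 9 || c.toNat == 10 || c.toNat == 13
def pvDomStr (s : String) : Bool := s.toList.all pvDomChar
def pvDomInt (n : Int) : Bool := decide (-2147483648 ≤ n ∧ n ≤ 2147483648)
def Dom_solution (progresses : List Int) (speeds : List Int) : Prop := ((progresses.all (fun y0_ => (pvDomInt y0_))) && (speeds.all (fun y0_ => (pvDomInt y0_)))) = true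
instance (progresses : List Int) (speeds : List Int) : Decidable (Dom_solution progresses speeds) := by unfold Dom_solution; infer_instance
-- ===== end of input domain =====

-- B replaces A's day-by-day simulation with ceiling division and its two-phase deque grouping
-- with a single pass (intended as faster; a timing run saw A time out where B returned, with
-- no clean ratio measured at sizes both finish); A mutates `progresses` in place — the
-- equivalence claimed here is about the RETURN value only.

-- ===== PORT A =====
-- the inner `while progresses[i] < 100: progresses[i] += speeds[i]; cnt += 1` loop;
-- the `0 < s` guard only makes the recursion total (Python diverges there; excluded by Pre_)
def daysLoopA (p s cnt : Int) : Int :=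
  if _h : p < 100 ∧ 0 < s then daysLoopA (p + s) s (cnt + 1) else cnt
termination_by (100 - p).toNat
decreasing_by omega

-- inner `while complete: if complete[0] <= tmp: popleft; cnt += 1 else break`
def popLeA (tmp : Int) : List Int → Int × List Int
  | [] => (0, [])
  | x :: xs =>
    if x ≤ tmp then
      let r := popLeA tmp xs
      (r.1 + 1, r.2)
    else (0, x :: xs)

lemma popLeA_length_le (tmp : Int) (xs : List Int) : (popLeA tmp xs).2.length ≤ xs.length := by
  induction xs with
  | nil => simp [popLeA]
  | cons x xs ih =>
    simp only [popLeA]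
    split
    · simpa using Nat.le_succ_of_le ih
    · simp

-- outer `while complete:` grouping loop (cnt is never 0 when the deque is nonempty)
def groupA : List Int → List Int
  | [] => []
  | x :: xs =>
    ((popLeA x xs).1 + 1) :: groupA (popLeA x xs).2
termination_by xs => xs.length
decreasing_by simpa using Nat.lt_succ_of_le (popLeA_length_le x xs)

def solution (progresses : List Int) (speeds : List Int) : List Int :=
  let complete := (List.range progresses.length).map (fun i =>
    daysLoopA (progresses.getD i 0) (speeds.getD i 0) 0)
  groupA complete

-- ===== PORT B =====
-- one fold step of Source B's loop; the answer list is accumulated reversed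
-- (`answer.append(1)` = cons 1, `answer[-1] += 1` = bump the head); `[]` under `some` is unreachable
def stepB (st : List Int × Option Int) (d : Int) : List Int × Option Int :=
  match st.2 with
  | none => (1 :: st.1, some d)
  | some L =>
    if L < d then (1 :: st.1, some d)
    else ((match st.1 with | [] => [] | a :: t => (a + 1) :: t), some L)

def solution_alt (progresses : List Int) (speeds : List Int) : List Int :=
  ((PySem.List.enumerate progresses 0).foldl
    (fun st ip =>
      stepB st (if ip.2 ≥ 100 then 0
                else -(PySem.Int.floordiv (ip.2 - 100) ((PySem.List.pyGet? speeds ip.1).getD 0))))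
    ([], none)).1.reverse

-- ===== PRECONDITION & SPEC =====
-- Exactly the inputs on which A returns: at each index with progress < 100 Python needs
-- speeds[i] to exist (else IndexError) and to be positive (else the while loop never ends).
def Pre_solution (progresses : List Int) (speeds : List Int) : Prop :=
  ∀ i : Nat, i < progresses.length → (100 ≤ progresses.getD i 0 ∨ 0 < speeds.getD i 0)
instance (progresses : List Int) (speeds : List Int) : Decidable (Pre_solution progresses speeds) := by
  unfold Pre_solution; infer_instance

def pvWitness_solution : List Int × List Int := ([93, 30, 55], [1, 30, 5])

def Spec_solution (progresses : List Int) (speeds : List Int) (out : List Int) : Prop := out = solution_alt progresses speeds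
instance (progresses : List Int) (speeds : List Int) (out : List Int) : Decidable (Spec_solution progresses speeds out) := by unfold Spec_solution; infer_instance

-- ===== CLAIM (what is proved, stated in full; the proofs are below) =====
def Claim_equal_solution : Prop := ∀ (progresses : List Int) (speeds : List Int), Dom_solution progresses speeds → Pre_solution progresses speeds → Spec_solution progresses speeds (solution progresses speeds)

-- ===== LEMMAS AND PROOFS =====

-- B's closed form for the number of days of one task
def daysB (p s : Int) : Int :=
  if p ≥ 100 then 0 else -(PySem.Int.floordiv (p - 100) s)

lemma daysB_step (p s : Int) (hp : p < 100) (hs : 0 < s) :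
    daysB p s = 1 + daysB (p + s) s := by
  unfold daysB
  by_cases h : p + s ≥ 100
  · have h1 : PySem.Int.floordiv (p - 100) s = -1 := by
      rw [PySem.Int.floordiv_eq_iff_of_pos hs]
      constructor <;> nlinarith
    simp [h1, not_le.mpr hp, h]
  · have h2 : PySem.Int.floordiv (p + s - 100) s = PySem.Int.floordiv (p - 100) s + 1 := by
      set q := PySem.Int.floordiv (p - 100) s with hq
      have hb := (PySem.Int.floordiv_eq_iff_of_pos (a := p - 100) (q := q) hs).mpr
      have hfact : q * s ≤ p - 100 ∧ p - 100 < (q + 1) * s := by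
        rw [hq]; exact (PySem.Int.floordiv_eq_iff_of_pos hs).mp rfl
      rw [PySem.Int.floordiv_eq_iff_of_pos hs]
      constructor <;> nlinarith [hfact.1, hfact.2]
    simp only [not_le.mpr hp, if_false, ge_iff_le, h, h2]
    ring

lemma daysLoopA_eq (p s cnt : Int) (h : 100 ≤ p ∨ 0 < s) :
    daysLoopA p s cnt = cnt + daysB p s := by
  by_cases hc : p < 100 ∧ 0 < s
  · rw [daysLoopA, dif_pos hc, daysLoopA_eq (p + s) s (cnt + 1) (Or.inr hc.2),
        daysB_step p s hc.1 hc.2]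
    ring
  · rw [daysLoopA, dif_neg hc]
    have hp : 100 ≤ p := by omega
    simp [daysB, hp]
termination_by (100 - p).toNat
decreasing_by omega

-- the fold of stepB over a list, starting inside a group with head count a and leader L,
-- finishes the group with popLeA and then behaves like groupA on the rest
lemma foldl_stepB_group (xs : List Int) : ∀ (a : Int) (acc : List Int) (L : Int),
    (xs.foldl stepB (a :: acc, some L)).1.reverse
      = acc.reverse ++ (a + (popLeA L xs).1) :: groupA (popLeA L xs).2 := by
  induction xs with
  | nil => intro a acc L; simp [popLeA, groupA]
  | cons y ys ih =>
    intro a acc L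
    by_cases hy : y ≤ L
    · have hst : stepB (a :: acc, some L) y = ((a + 1) :: acc, some L) := by
        simp [stepB, not_lt.mpr hy]
      simp only [List.foldl_cons, hst, ih, popLeA, if_pos hy]
      ring_nf
    · have hst : stepB (a :: acc, some L) y = (1 :: a :: acc, some y) := by
        simp [stepB, not_le.mp hy]
      simp only [List.foldl_cons, hst, ih, popLeA, if_neg hy]
      rw [groupA]
      simp
      ring_nf

lemma foldl_stepB_eq_groupA (xs : List Int) :
    (xs.foldl stepB ([], none)).1.reverse = groupA xs := by
  cases xs with
  | nil => simp [groupA]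
  | cons x xs =>
    have hst : stepB (([] : List Int), none) x = ([1], some x) := by simp [stepB]
    rw [List.foldl_cons, hst, foldl_stepB_group xs 1 [] x, groupA]
    simp
    ring_nf

-- the per-element computation B folds with, as a map (foldl_map fusion)
lemma solution_alt_eq_groupA_map (progresses speeds : List Int) :
    solution_alt progresses speeds
      = groupA ((PySem.List.enumerate progresses 0).map
          (fun ip => if ip.2 ≥ 100 then 0
                     else -(PySem.Int.floordiv (ip.2 - 100) ((PySem.List.pyGet? speeds ip.1).getD 0)))) := by
  rw [solution_alt, ← foldl_stepB_eq_groupA, List.foldl_map]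

theorem solution_spec : Claim_equal_solution := by
  intro progresses speeds _hDom hPre
  unfold Spec_solution
  rw [solution_alt_eq_groupA_map, solution]
  congr 1
  apply List.ext_getElem
  · simp [PySem.List.length_enumerate]
  · intro i h1 h2
    simp only [List.getElem_map, List.getElem_range, PySem.List.getElem_enumerate]
    have hi : i < progresses.length := by
      simpa [PySem.List.length_enumerate] using h2
    have hget : progresses.getD i 0 = progresses[i] := List.getD_eq_getElem _ _ hi
    have hd : ((PySem.List.pyGet? speeds ((i : Nat) : Int)).getD 0) = speeds.getD i 0 := by
      rw [PySem.List.pyGet?_natCast]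
      cases h : speeds[i]? with
      | none => simp [List.getD, h]
      | some v => simp [List.getD, h]
    rw [daysLoopA_eq _ _ _ (hPre i hi)]
    simp only [zero_add, daysB, hd, hget]
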